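-- pv_equiv track=rewrite | github.com/ryan-blunden/daily-routine | scripts/plan.py | find_block_ranges
-- ===== SOURCE A (Python) =====
-- def find_block_ranges(lines: list[str]) -> list[tuple[int, int]]:
--     starts = [i for i, line in enumerate(lines) if line.strip() == "[[blocks]]"]
--     if not starts:
--         return []
--     ranges: list[tuple[int, int]] = []
--     for idx, start in enumerate(starts):
--         end = starts[idx + 1] if idx + 1 < len(starts) else len(lines)
--         ranges.append((start, end))
--     return ranges
-- ===== SOURCE B (Python) =====
-- def find_block_ranges(lines: list[str]) -> list[tuple[int, int]]:
--     ranges: list[tuple[int, int]] = []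
--     open_start = None
--     for i, line in enumerate(lines):
--         if line.strip() == "[[blocks]]":
--             if open_start is not None:
--                 ranges.append((open_start, i))
--             open_start = i
--     if open_start is not None:
--         ranges.append((open_start, len(lines)))
--     return ranges
-- ===== Notes on version B (the rewrite author's own statement) =====
-- stated objective: simpler
-- what changed: Replaced the two-pass approach (build the list of marker indices, then loop over it with a lookahead index to pair each start with the next) by a single streaming pass that keeps one open_start variable and emits a range whenever the next marker or the end of input is reached, never materialising the starts list.
import Mathlib
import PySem

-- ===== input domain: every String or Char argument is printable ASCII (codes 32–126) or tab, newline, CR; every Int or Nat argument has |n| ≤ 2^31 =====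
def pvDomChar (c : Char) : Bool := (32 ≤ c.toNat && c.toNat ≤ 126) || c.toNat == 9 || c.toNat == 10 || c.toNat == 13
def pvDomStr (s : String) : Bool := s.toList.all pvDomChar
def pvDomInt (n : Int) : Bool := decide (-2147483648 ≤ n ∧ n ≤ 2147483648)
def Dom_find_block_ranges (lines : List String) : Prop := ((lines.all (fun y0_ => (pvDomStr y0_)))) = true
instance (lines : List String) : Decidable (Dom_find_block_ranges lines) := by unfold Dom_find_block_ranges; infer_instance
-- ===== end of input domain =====

-- B replaces A's two-pass (collect marker indices, then pair with a lookahead) by one streaming pass with an open_start accumulator (objective: simpler).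


-- ===== PORT A =====
-- starts = [i for i, line in enumerate(lines) if line.strip() == "[[blocks]]"]; then pair each start
-- with the next one (lookup starts[idx+1], guarded in range, so pyGetD is exact) or len(lines).
def find_block_ranges (lines : List String) : List (Int × Int) :=
  let starts : List Int :=
    ((PySem.List.enumerate lines).filter
      (fun p => PySem.Str.strip p.2 == "[[blocks]]")).map (·.1)
  if starts = [] then []
  else
    (PySem.List.enumerate starts).foldl
      (fun ranges p =>
        ranges ++ [(p.2,
          if p.1 + 1 < PySem.List.len starts
          then PySem.List.pyGetD starts (p.1 + 1) 0
          else PySem.List.len lines)]) []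

-- ===== PORT B =====
-- single pass: state = (ranges so far, open_start); emit (open_start, i) at each new marker,
-- and (open_start, len(lines)) at the end if a marker is open.
def find_block_ranges_alt (lines : List String) : List (Int × Int) :=
  let st := (PySem.List.enumerate lines).foldl
    (fun (st : List (Int × Int) × Option Int) p =>
      if PySem.Str.strip p.2 == "[[blocks]]" then
        match st.2 with
        | some s => (st.1 ++ [(s, p.1)], some p.1)
        | none   => (st.1, some p.1)
      else st) ([], none)
  match st.2 with
  | some s => st.1 ++ [(s, PySem.List.len lines)]
  | none   => st.1

-- ===== PRECONDITION & SPEC =====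
def Spec_find_block_ranges (lines : List String) (out : List (Int × Int)) : Prop := out = find_block_ranges_alt lines
instance (lines : List String) (out : List (Int × Int)) : Decidable (Spec_find_block_ranges lines out) := by unfold Spec_find_block_ranges; infer_instance

-- ===== CLAIM (what is proved, stated in full; the proofs are below) =====
def Claim_equal_find_block_ranges : Prop := ∀ (lines : List String), Dom_find_block_ranges lines → Spec_find_block_ranges lines (find_block_ranges lines)

-- ===== LEMMAS AND PROOFS =====

/-- Pair each element of `S` with its successor in `S`, the last one with `n`. -/
def pairAdj : List Int → Int → List (Int × Int)
  | [], _ => []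
  | [a], n => [(a, n)]
  | a :: b :: r, n => (a, b) :: pairAdj (b :: r) n

theorem pairAdj_getElem? (S : List Int) (n : Int) (i : Nat) :
    (pairAdj S n)[i]? = S[i]?.map (fun a => (a, S.getD (i + 1) n)) := by
  fun_induction pairAdj S n generalizing i with
  | case1 n => simp
  | case2 a n =>
    cases i with
    | zero => simp [List.getD]
    | succ j => simp
  | case3 a b r n ih =>
    cases i with
    | zero => simp [List.getD]
    | succ j =>
      simpa [pairAdj, List.getD] using ih j

/-- A's pairing loop, after folding-to-map, is `pairAdj`. -/
theorem mapA_eq_pairAdj (S : List Int) (n : Int) :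
    (PySem.List.enumerate S).map
      (fun p => (p.2,
        if p.1 + 1 < PySem.List.len S
        then PySem.List.pyGetD S (p.1 + 1) 0
        else n)) = pairAdj S n := by
  apply List.ext_getElem?
  intro i
  rw [List.getElem?_map, PySem.List.getElem?_enumerate, pairAdj_getElem?]
  cases h : S[i]? with
  | none => simp
  | some a =>
    obtain ⟨hi, -⟩ := List.getElem?_eq_some_iff.mp h
    simp only [Option.map_some]
    congr 1
    have hcast : (0 : Int) + (i : Int) + 1 = ((i + 1 : Nat) : Int) := by push_cast; ring
    by_cases hlt : i + 1 < S.length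
    · rw [if_pos (by simp [PySem.List.len_eq]; omega)]
      rw [hcast, PySem.List.pyGetD_natCast]
      simp [List.getD, List.getElem?_eq_getElem hlt]
    · rw [if_neg (by simp [PySem.List.len_eq]; omega)]
      simp [List.getD, List.getElem?_eq_none (by omega : S.length ≤ i + 1)]

/-- B's streaming state step, phrased over the marker-index list alone. -/
def stepB (st : List (Int × Int) × Option Int) (i : Int) : List (Int × Int) × Option Int :=
  match st.2 with
  | some s => (st.1 ++ [(s, i)], some i)
  | none   => (st.1, some i)

def finB (n : Int) (st : List (Int × Int) × Option Int) : List (Int × Int) :=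
  match st.2 with
  | some s => st.1 ++ [(s, n)]
  | none   => st.1

theorem foldB_some (S : List Int) (n : Int) :
    ∀ (acc : List (Int × Int)) (s : Int),
      finB n (S.foldl stepB (acc, some s)) = acc ++ pairAdj (s :: S) n := by
  induction S with
  | nil => intro acc s; simp [finB, pairAdj]
  | cons a S ih =>
    intro acc s
    have : stepB (acc, some s) a = (acc ++ [(s, a)], some a) := rfl
    rw [List.foldl_cons, this, ih]
    cases S <;> simp [pairAdj]
  
theorem foldB_none (S : List Int) (n : Int) (acc : List (Int × Int)) :
    finB n (S.foldl stepB (acc, none)) = acc ++ pairAdj S n := by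
  cases S with
  | nil => simp [finB, pairAdj]
  | cons a S =>
    have : stepB (acc, none) a = (acc, some a) := rfl
    rw [List.foldl_cons, this, foldB_some]

theorem A_eq_pairAdj (lines : List String) :
    find_block_ranges lines =
      pairAdj (((PySem.List.enumerate lines).filter
        (fun p => PySem.Str.strip p.2 == "[[blocks]]")).map (·.1)) (PySem.List.len lines) := by
  unfold find_block_ranges
  set S := ((PySem.List.enumerate lines).filter
    (fun p => PySem.Str.strip p.2 == "[[blocks]]")).map (·.1) with hS
  by_cases h : S = []
  · simp [h, pairAdj]
  · rw [if_neg h, PySem.List.foldl_append_singleton_eq_map, List.nil_append,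
      mapA_eq_pairAdj]

theorem B_eq_pairAdj (lines : List String) :
    find_block_ranges_alt lines =
      pairAdj (((PySem.List.enumerate lines).filter
        (fun p => PySem.Str.strip p.2 == "[[blocks]]")).map (·.1)) (PySem.List.len lines) := by
  unfold find_block_ranges_alt
  have hfilter :
      (PySem.List.enumerate lines).foldl
        (fun (st : List (Int × Int) × Option Int) p =>
          if PySem.Str.strip p.2 == "[[blocks]]" then
            match st.2 with
            | some s => (st.1 ++ [(s, p.1)], some p.1)
            | none   => (st.1, some p.1)
          else st) ([], none)
      = (((PySem.List.enumerate lines).filter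
          (fun p => PySem.Str.strip p.2 == "[[blocks]]")).map (·.1)).foldl stepB ([], none) := by
    rw [PySem.List.foldl_if_eq_foldl_filter, List.foldl_map]
    rfl
  rw [hfilter]
  exact foldB_none _ _ []

-- ===== VERDICT (by name: the statement is the Claim_ definition above) =====
theorem find_block_ranges_spec : Claim_equal_find_block_ranges := by
  intro lines _
  unfold Spec_find_block_ranges
  rw [A_eq_pairAdj, B_eq_pairAdj]
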